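-- pv_equiv track=rewrite | github.com/darisdzakwanhoesien2/research_landscape | pages/04_data.py | extract_log_messages
-- ===== SOURCE A (Python) =====
-- def extract_log_messages(text):
--     errors = []
--     warnings = []
--     overfull = []
--
--     for line in text.splitlines():
--         if line.startswith("!"):
--             errors.append(line)
--         elif "Warning" in line:
--             warnings.append(line)
--         elif "Overfull" in line or "Underfull" in line:
--             overfull.append(line)
--
--     return errors, warnings, overfull
-- ===== SOURCE B (Python) =====
-- def extract_log_messages(text):
--     lines = text.splitlines()
--     errors = [l for l in lines if l.startswith("!")]
--     warnings = [l for l in lines if not l.startswith("!") and "Warning" in l]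
--     overfull = [l for l in lines
--                 if not l.startswith("!") and "Warning" not in l
--                 and ("Overfull" in l or "Underfull" in l)]
--     return errors, warnings, overfull
-- ===== Notes on version B (the rewrite author's own statement) =====
-- stated objective: alternative
-- what changed: Replaced the single shared elif loop with three independent filtering passes (list comprehensions), each carrying the negated earlier guards to keep the priority.
import Mathlib
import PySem

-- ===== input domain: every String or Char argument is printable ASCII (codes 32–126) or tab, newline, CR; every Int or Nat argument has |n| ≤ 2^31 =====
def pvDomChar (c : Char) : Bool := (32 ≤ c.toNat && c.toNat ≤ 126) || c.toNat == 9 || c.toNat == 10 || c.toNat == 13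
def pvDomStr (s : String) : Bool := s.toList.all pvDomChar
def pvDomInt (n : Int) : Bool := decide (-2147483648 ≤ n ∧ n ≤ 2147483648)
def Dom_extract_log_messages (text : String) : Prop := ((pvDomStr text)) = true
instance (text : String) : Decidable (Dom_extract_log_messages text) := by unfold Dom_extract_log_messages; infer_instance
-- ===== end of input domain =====

-- B replaces A's single elif loop by three independent filtering passes with negated guards (alternative decomposition, same cost).

-- ===== PORT A =====
-- one elif chain step over the (errors, warnings, overfull) accumulator
def extract_log_messages (text : String) : List String × List String × List String :=
  (PySem.Str.splitlines text).foldl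
    (fun acc line =>
      if PySem.Str.startswith line "!" then (acc.1 ++ [line], acc.2.1, acc.2.2)
      else if PySem.Str.isIn "Warning" line then (acc.1, acc.2.1 ++ [line], acc.2.2)
      else if PySem.Str.isIn "Overfull" line || PySem.Str.isIn "Underfull" line then
        (acc.1, acc.2.1, acc.2.2 ++ [line])
      else acc)
    ([], [], [])

-- ===== PORT B =====
def extract_log_messages_alt (text : String) : List String × List String × List String :=
  let lines := PySem.Str.splitlines text
  (lines.filter (fun l => PySem.Str.startswith l "!"),
   lines.filter (fun l => !PySem.Str.startswith l "!" && PySem.Str.isIn "Warning" l),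
   lines.filter (fun l => !PySem.Str.startswith l "!" && !PySem.Str.isIn "Warning" l
     && (PySem.Str.isIn "Overfull" l || PySem.Str.isIn "Underfull" l)))

-- ===== PRECONDITION & SPEC =====
def Spec_extract_log_messages (text : String) (out : List String × List String × List String) : Prop := out = extract_log_messages_alt text
instance (text : String) (out : List String × List String × List String) : Decidable (Spec_extract_log_messages text out) := by unfold Spec_extract_log_messages; infer_instance

-- ===== CLAIM (what is proved, stated in full; the proofs are below) =====
def Claim_equal_extract_log_messages : Prop := ∀ (text : String), Dom_extract_log_messages text → Spec_extract_log_messages text (extract_log_messages text)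

-- ===== LEMMAS AND PROOFS =====
theorem elm_foldl_inv (ls : List String) (e w o : List String) :
    ls.foldl
      (fun acc line =>
        if PySem.Str.startswith line "!" then (acc.1 ++ [line], acc.2.1, acc.2.2)
        else if PySem.Str.isIn "Warning" line then (acc.1, acc.2.1 ++ [line], acc.2.2)
        else if PySem.Str.isIn "Overfull" line || PySem.Str.isIn "Underfull" line then
          (acc.1, acc.2.1, acc.2.2 ++ [line])
        else acc)
      (e, w, o)
    = (e ++ ls.filter (fun l => PySem.Str.startswith l "!"),
       w ++ ls.filter (fun l => !PySem.Str.startswith l "!" && PySem.Str.isIn "Warning" l),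
       o ++ ls.filter (fun l => !PySem.Str.startswith l "!" && !PySem.Str.isIn "Warning" l
         && (PySem.Str.isIn "Overfull" l || PySem.Str.isIn "Underfull" l))) := by
  induction ls generalizing e w o with
  | nil => simp
  | cons hd tl ih =>
    by_cases h1 : PySem.Str.startswith hd "!"
    · rw [List.foldl_cons, if_pos h1, ih]
      simp at h1
      simp [h1]
    · by_cases h2 : PySem.Str.isIn "Warning" hd
      · rw [List.foldl_cons, if_neg (by simpa using h1), if_pos h2, ih]
        simp at h1
        simp at h2
        simp [h1, h2]
      · by_cases h3 : (PySem.Str.isIn "Overfull" hd || PySem.Str.isIn "Underfull" hd) = true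
        · rw [List.foldl_cons, if_neg (by simpa using h1), if_neg (by simpa using h2), if_pos h3, ih]
          simp at h1
          simp at h2
          simp at h3
          simp [h1, h2, h3]
        · rw [List.foldl_cons, if_neg (by simpa using h1), if_neg (by simpa using h2), if_neg (by simpa using h3), ih]
          simp at h1
          simp at h2
          simp at h3
          simp [h1, h2, h3]

-- ===== VERDICT (by name: the statement is the Claim_ definition above) =====
theorem extract_log_messages_spec : Claim_equal_extract_log_messages := by
  intro text _
  unfold Spec_extract_log_messages extract_log_messages extract_log_messages_alt
  simpa using elm_foldl_inv (PySem.Str.splitlines text) [] [] []
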